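-- pv_equiv track=rewrite | github.com/GUOGUO-alt-oss/SageAgent | clean_text.py | group_by_video
-- ===== SOURCE A (Python) =====
-- def group_by_video(items):
--     groups = {}
--     for it in items:
--         vid = it.get("video_id", "unknown")
--         groups.setdefault(vid, []).append(it)
--     for vid in groups:
--         groups[vid].sort(key=lambda x: (int(x.get("start_ms", 0)), int(x.get("end_ms", 0))))
--     return groups
-- ===== SOURCE B (Python) =====
-- def group_by_video(items):
--     items = list(items)
--     order = list(dict.fromkeys(it.get("video_id", "unknown") for it in items))
--     key = lambda x: (int(x.get("start_ms", 0)), int(x.get("end_ms", 0)))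
--     return {vid: sorted([it for it in items if it.get("video_id", "unknown") == vid], key=key)
--             for vid in order}
-- ===== Notes on version B (the rewrite author's own statement) =====
-- stated objective: alternative
-- what changed: A builds the groups incrementally with setdefault/append in one pass then sorts each dict value in place; B first dedups the video ids in first-appearance order and then builds each group independently by filtering the materialized item list and sorting it.
import Mathlib
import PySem

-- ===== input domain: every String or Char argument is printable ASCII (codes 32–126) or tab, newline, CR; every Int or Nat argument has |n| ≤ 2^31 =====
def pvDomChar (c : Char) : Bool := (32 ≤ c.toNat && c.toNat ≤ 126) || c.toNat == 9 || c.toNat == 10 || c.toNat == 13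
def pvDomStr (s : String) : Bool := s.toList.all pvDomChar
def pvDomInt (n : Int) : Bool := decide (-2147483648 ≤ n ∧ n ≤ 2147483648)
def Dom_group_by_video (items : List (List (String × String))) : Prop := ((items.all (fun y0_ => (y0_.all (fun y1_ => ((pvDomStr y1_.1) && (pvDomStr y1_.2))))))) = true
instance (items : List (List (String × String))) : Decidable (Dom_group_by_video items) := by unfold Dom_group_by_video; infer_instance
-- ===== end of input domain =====

-- B replaces A's incremental dict-of-appending-lists by a two-phase decomposition:
-- dedup the video ids in first-appearance order, then build each group by filtering (objective: alternative).

-- shared low-level helpers: it.get(k, default) on the inner dict (first match), and the sort key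
def pvItemGet? (it : List (String × String)) (k : String) : Option String :=
  (PySem.Dict.mk it).get? k

-- int(x.get(k, 0)): absent key -> 0; present -> int(value) (Pre_ guarantees the parse succeeds)
def pvMs (it : List (String × String)) (k : String) : Int :=
  match pvItemGet? it k with
  | none => 0
  | some s => (PySem.Int.ofStr? s).getD 0

def pvVid (it : List (String × String)) : String :=
  match pvItemGet? it "video_id" with
  | none => "unknown"
  | some s => s

-- ===== PORT A =====
def group_by_video (items : List (List (String × String))) : List (String × List (List (String × String))) :=
  let groups : PySem.Dict String (List (List (String × String))) :=
    items.foldl (fun d it => d.modify (pvVid it) [] (· ++ [it])) PySem.Dict.empty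
  groups.items.map (fun p =>
    (p.1, PySem.List.sorted2 p.2 (fun x => pvMs x "start_ms") (fun x => pvMs x "end_ms")))

-- ===== PORT B =====
def group_by_video_alt (items : List (List (String × String))) : List (String × List (List (String × String))) :=
  let order : List String := PySem.List.dedup (items.map pvVid)
  order.map (fun vid =>
    (vid, PySem.List.sorted2 (items.filter (fun it => pvVid it == vid))
            (fun x => pvMs x "start_ms") (fun x => pvMs x "end_ms")))

-- ===== PRECONDITION & SPEC =====
-- Pre_ excludes exactly the inputs where Python A raises ValueError: an item whose
-- "start_ms" or "end_ms" value is present but not int()-parseable.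
def Pre_group_by_video (items : List (List (String × String))) : Prop :=
  ∀ it ∈ items, ∀ k ∈ ["start_ms", "end_ms"],
    ∀ s, pvItemGet? it k = some s → (PySem.Int.ofStr? s).isSome = true
instance (items : List (List (String × String))) : Decidable (Pre_group_by_video items) := by
  unfold Pre_group_by_video; infer_instance

def pvWitness_group_by_video : (List (List (String × String))) :=
  [[("video_id", "a"), ("start_ms", "20")],
   [("video_id", "b")],
   [("video_id", "a"), ("start_ms", " 7 "), ("end_ms", "5")]]

def Spec_group_by_video (items : List (List (String × String))) (out : List (String × List (List (String × String)))) : Prop := out = group_by_video_alt items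
instance (items : List (List (String × String))) (out : List (String × List (List (String × String)))) : Decidable (Spec_group_by_video items out) := by unfold Spec_group_by_video; infer_instance

-- ===== CLAIM (what is proved, stated in full; the proofs are below) =====
def Claim_equal_group_by_video : Prop := ∀ (items : List (List (String × String))), Dom_group_by_video items → Pre_group_by_video items → Spec_group_by_video items (group_by_video items)

-- ===== LEMMAS AND PROOFS =====

theorem gbv_foldl_eq (items : List (List (String × String))) :
    items.foldl (fun d it => d.modify (pvVid it) [] (· ++ [it])) PySem.Dict.empty
      = (items.map (fun it => (pvVid it, it))).foldl
          (fun d p => d.modify p.1 [] (· ++ [p.2])) PySem.Dict.empty := by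
  rw [List.foldl_map]

theorem gbv_keys (items : List (List (String × String))) :
    (items.foldl (fun d it => d.modify (pvVid it) [] (· ++ [it]))
        (PySem.Dict.empty : PySem.Dict String (List (List (String × String))))).keys
      = PySem.List.dedup (items.map pvVid) := by
  rw [PySem.Dict.keys_foldl_modify_key items pvVid [] (fun _ it => (· ++ [it]))]
  rw [PySem.List.dedup_eq_ofList, PySem.Set.update_eq_append_filter]
  simp [PySem.Dict.keys_empty, PySem.Set.contains]

theorem gbv_getD (items : List (List (String × String))) (c : String) :
    (items.foldl (fun d it => d.modify (pvVid it) [] (· ++ [it]))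
        (PySem.Dict.empty : PySem.Dict String (List (List (String × String))))).getD c []
      = items.filter (fun it => pvVid it == c) := by
  rw [gbv_foldl_eq, PySem.Dict.getD_foldl_modify_append]
  simp [PySem.Dict.getD_empty, List.filter_map, Function.comp_def, List.map_map]

theorem group_by_video_spec : Claim_equal_group_by_video := by
  intro items _ _
  show group_by_video items = group_by_video_alt items
  simp only [group_by_video, group_by_video_alt]
  rw [PySem.Dict.items_eq_map_keys
        (items.foldl (fun d it => d.modify (pvVid it) [] (· ++ [it])) PySem.Dict.empty)
        (PySem.Dict.nodup_keys_foldl_modify_key items pvVid [] (fun _ it => (· ++ [it]))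
          PySem.Dict.empty (by simp [PySem.Dict.keys_empty])) []]
  rw [gbv_keys, List.map_map]
  exact List.map_congr_left (fun k _ => by simp [gbv_getD])
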